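-- pv_equiv track=rewrite | github.com/kiipo0623/Algorithm-2022 | 0525/2019line.py | solution
-- ===== SOURCE A (Python) =====
-- from collections import deque
--
-- def solution(C, B):
--     answer = int(1e9)
--     CONY = [C]
--     pos, mv = C, 0
--     while pos <= 200000:
--         mv += 1
--         pos += mv
--         CONY.append(pos)
--
--     q = deque()
--     q.append((0, B))
--
--     while q:
--         time, Bpos = q.popleft()
--         if Bpos<0 or Bpos>200000:
--             continue
--         if Bpos == CONY[time]:
--             answer = min(answer, time)
--             return answer
--         q.append((time+1, Bpos+1))
--         q.append((time+1, Bpos-1))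
--         q.append((time+1, Bpos*2))
--
--     return -1
-- ===== SOURCE B (Python) =====
-- def solution(C, B):
--     # Level-by-level BFS over the board [0, 200000] with a visited set per
--     # time step; CONY's position advances incrementally alongside.
--     if B < 0 or B > 200000:
--         return -1
--     cur = {B}
--     cony = C
--     t = 0
--     while cony <= 200000:
--         if cony in cur:
--             return t
--         nxt = set()
--         for p in cur:
--             for q in (p - 1, p + 1, p * 2):
--                 if 0 <= q <= 200000:
--                     nxt.add(q)
--         cur = nxt
--         t += 1
--         cony += t
--     return -1
-- ===== Notes on version B (the rewrite author's own statement) =====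
-- stated objective: alternative
-- what changed: A's unpruned 3-way-branching BFS queue (no visited set, CONY precomputed as a list) is replaced by a level-by-level BFS that keeps one deduplicated set of positions in [0,200000] per time step, with CONY's position advanced incrementally; this is O(T*200000) instead of O(3^T).
import Mathlib
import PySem

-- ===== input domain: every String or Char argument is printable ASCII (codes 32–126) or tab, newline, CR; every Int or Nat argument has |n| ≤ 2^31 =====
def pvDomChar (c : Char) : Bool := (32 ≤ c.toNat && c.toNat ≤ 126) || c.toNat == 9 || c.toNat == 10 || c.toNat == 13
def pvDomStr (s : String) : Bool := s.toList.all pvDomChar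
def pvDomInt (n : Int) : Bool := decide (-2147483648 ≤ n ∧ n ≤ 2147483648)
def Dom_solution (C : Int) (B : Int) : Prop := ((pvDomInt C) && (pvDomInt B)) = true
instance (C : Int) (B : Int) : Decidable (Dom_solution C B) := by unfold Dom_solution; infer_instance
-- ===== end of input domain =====

-- B replaces A's unpruned 3-way-branching BFS queue (no visited set) by a level-by-level
-- BFS that keeps one visited set of positions per time step (alternative algorithm;
-- equivalence is about the RETURN value, neither version mutates its arguments).

-- ===== PORT A =====
-- the 'while pos <= 200000' CONY-building loop (list.append via a reversed accumulator;
-- the fuel 100000 is a totality artifice only, ample for every |C| ≤ 2^31)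
def conyBuild : Nat → Int → Int → List Int → List Int
  | 0, _, _, acc => acc.reverse
  | n+1, pos, mv, acc =>
    if pos ≤ 200000 then conyBuild n (pos + (mv + 1)) (mv + 1) ((pos + (mv + 1)) :: acc)
    else acc.reverse

-- collections.deque ported as the standard two-list FIFO queue (identical pop order,
-- amortized O(1) popleft/append); dqPop is deque.popleft
def dqPop : List (Int × Int) → List (Int × Int) →
    Option ((Int × Int) × List (Int × Int) × List (Int × Int))
  | [], b =>
    match b.reverse with
    | [] => none
    | x :: f => some (x, f, [])
  | x :: f, b => some (x, f, b)

-- the 'while q' BFS loop; 'CONY[time]' raising IndexError is pyGet? = none (reached only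
-- outside Pre_; sentinel -2), and fuel exhaustion likewise happens only outside Pre_
def bfsA (cony : List Int) : Nat → List (Int × Int) → List (Int × Int) → Int → Int
  | 0, _, _, _ => -2
  | n+1, front, back, ans =>
    match dqPop front back with
    | none => -1
    | some ((time, bpos), f, b) =>
      if bpos < 0 ∨ bpos > 200000 then bfsA cony n f b ans
      else
        match PySem.List.pyGet? cony time with
        | none => -2
        | some c =>
          if bpos = c then min ans time
          else bfsA cony n f ((time + 1, bpos * 2) :: (time + 1, bpos - 1) :: (time + 1, bpos + 1) :: b) ans

def solution (C : Int) (B : Int) : Int :=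
  let cony := conyBuild 100000 C 0 [C]
  bfsA cony (3 ^ 65602) [(0, B)] [] 1000000000

-- single-list reference queue for the proofs

-- ===== PORT B =====
-- one BFS level: every position reachable in one move from cur, kept inside [0, 200000]
def altExpand (cur : PySem.Set Int) : PySem.Set Int :=
  cur.foldl (fun nxt p =>
    [p - 1, p + 1, p * 2].foldl (fun nxt q =>
      if 0 ≤ q ∧ q ≤ 200000 then PySem.Set.add nxt q else nxt) nxt) PySem.Set.empty

-- the 'while cony <= 200000' loop (fuel 100000 is a totality artifice, ample on the domain)
def altLoop : Nat → PySem.Set Int → Int → Int → Int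
  | 0, _, _, _ => -2
  | n+1, cur, cony, t =>
    if cony ≤ 200000 then
      if PySem.Set.contains cur cony then t
      else altLoop n (altExpand cur) (cony + (t + 1)) (t + 1)
    else -1

def solution_alt (C : Int) (B : Int) : Int :=
  if B < 0 ∨ B > 200000 then -1
  else altLoop 100000 (PySem.Set.ofList [B]) C 0

-- ===== PRECONDITION & SPEC =====
-- Helpers deciding "Brother can ever stand on CONY's cell" (a meeting exists): the set of
-- positions reachable in exactly t moves inside [0,200000] is kept as a bit set (bit p =
-- position p reachable) so that the decision evaluates fast; pvSpread moves every bit p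
-- to bit 2p (one doubling move) by the logarithmic interleave-with-zeros mask scheme.
def pvMaskRep (g : Nat) : Nat → Nat
  | 0 => 2 ^ g - 1
  | i+1 => pvMaskRep g i ||| (pvMaskRep g i <<< (2 * g * 2 ^ i))
def pvMaskList : List Nat := (List.range 17).map fun j => pvMaskRep (2 ^ j) (19 - j)
def pvSpreadN : Nat → Nat → Nat
  | 0, x => x
  | j+1, x => pvSpreadN j ((x ||| (x <<< 2 ^ j)) &&& pvMaskList.getD j 0)
def pvSpread (x : Nat) : Nat := pvSpreadN 17 x
def pvTop : Nat := 2 ^ 200001 - 1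
def pvLow : Nat := 2 ^ 100001 - 1
-- one move: bit p spawns bits p-1, p+1 and 2p, clipped to [0, 200000]
def pvStepBits (s : Nat) : Nat :=
  if s == pvTop then pvTop
  else
    let y := s &&& pvLow
    let d := if y == 0 then 0 else pvSpread y
    ((s >>> 1) ||| (s <<< 1) ||| d) &&& pvTop
-- walk CONY (cony += inc; inc += 1) against the level sets until CONY leaves the board
def pvMeetLoop : Nat → Nat → Int → Int → Bool
  | 0, _, _, _ => false
  | n+1, s, cony, inc =>
    if cony > 200000 then false
    else if 0 ≤ cony && s.testBit cony.toNat then true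
    else pvMeetLoop n (pvStepBits s) (cony + inc) (inc + 1)
def pvMeets (C : Int) (B : Int) : Bool :=
  if B < 0 || B > 200000 then false else pvMeetLoop 65601 (2 ^ B.toNat) C 1

-- Pre_ excludes exactly the inputs on which Brother can never stand on CONY's cell while
-- it is still on the board: there A's BFS runs off the end of the CONY list and raises
-- IndexError (returning nothing), while B returns -1.
def Pre_solution (C : Int) (B : Int) : Prop :=
  B < 0 ∨ B > 200000 ∨ pvMeets C B = true
instance (C : Int) (B : Int) : Decidable (Pre_solution C B) := by
  unfold Pre_solution; infer_instance

def pvWitness_solution : Int × Int := (7, 7)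

def Spec_solution (C : Int) (B : Int) (out : Int) : Prop := out = solution_alt C B
instance (C : Int) (B : Int) (out : Int) : Decidable (Spec_solution C B out) := by
  unfold Spec_solution; infer_instance

-- ===== CLAIM (what is proved, stated in full; the proofs are below) =====
def Claim_equal_solution : Prop :=
  ∀ (C : Int) (B : Int), Dom_solution C B → Pre_solution C B → Spec_solution C B (solution C B)

-- ===== LEMMAS AND PROOFS =====

theorem tb_false {y i : Nat} (h : y < 2 ^ 131072) (hi : 131072 ≤ i) : y.testBit i = false :=
  Nat.testBit_eq_false_of_lt (lt_of_lt_of_le h (Nat.pow_le_pow_right (by norm_num) hi))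

theorem pvMaskRep_testBit (g : Nat) (hg : 0 < g) :
    ∀ (w j : Nat), (pvMaskRep g w).testBit j = (decide (j < 2 * g * 2 ^ w) && decide (j % (2 * g) < g)) := by
  intro w
  induction w with
  | zero =>
    intro j
    simp only [pvMaskRep, Nat.testBit_two_pow_sub_one, pow_zero, mul_one]
    by_cases h2 : j < 2 * g
    · have h1 : j % (2 * g) = j := Nat.mod_eq_of_lt h2
      rw [h1]
      by_cases h : j < g <;> simp [h] <;> omega
    · have h1 : ¬ j < g := by omega
      simp [h1, h2]
  | succ w ih =>
    intro j
    simp only [pvMaskRep, Nat.testBit_lor, Nat.testBit_shiftLeft, ih, ge_iff_le]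
    have hmod : 2 * g * 2 ^ w ≤ j → (j - 2 * g * 2 ^ w) % (2 * g) = j % (2 * g) := by
      intro hS; exact Nat.sub_mul_mod (by omega)
    have hpow : (2:Nat) * g * 2 ^ (w + 1) = 2 * (2 * g * 2 ^ w) := by ring
    rw [hpow]
    generalize hA : 2 * g * 2 ^ w = A at *
    have hApos : 0 < A := by subst hA; positivity
    by_cases hS : A ≤ j
    · have h2 := hmod hS
      by_cases hP : j % (2 * g) < g <;>
        simp [hP, hS, h2, ← Bool.decide_or, ← Bool.decide_and, decide_eq_decide] <;> omega
    · by_cases hP : j % (2 * g) < g <;>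
        simp [hS, hP, ← Bool.decide_or, ← Bool.decide_and, decide_eq_decide] <;> omega

theorem spreadStep (g w y x : Nat) (hg1 : 1 ≤ g) (hg2 : g ≤ 65536) (hw : 2 * g * 2 ^ w = 1048576)
    (hy : y < 2 ^ 131072)
    (hx : ∀ i, x.testBit i =
      (decide (i % (4 * g) < 2 * g) && y.testBit (2 * g * (i / (4 * g)) + i % (4 * g)))) :
    ∀ i, ((x ||| (x <<< g)) &&& pvMaskRep g w).testBit i =
      (decide (i % (2 * g) < g) && y.testBit (g * (i / (2 * g)) + i % (2 * g))) := by
  intro i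
  have hmask := pvMaskRep_testBit g (by omega) w i
  rw [hw] at hmask
  simp only [Nat.testBit_land, Nat.testBit_lor, Nat.testBit_shiftLeft, hmask, ge_iff_le]
  by_cases hbig : 1048576 ≤ i
  · -- both sides false: the mask cuts the left, the index overruns y on the right
    have hR : y.testBit (g * (i / (2 * g)) + i % (2 * g)) = false := by
      have h1 : 2 * g * (i / (2 * g)) + i % (2 * g) = i := Nat.div_add_mod i (2 * g)
      have h2 : i % (2 * g) < 2 * g := Nat.mod_lt _ (by omega)
      have h3 : 2 * (g * (i / (2 * g))) + i % (2 * g) = i := by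
        rw [Nat.mul_assoc] at h1; exact h1
      apply tb_false hy
      generalize hU : g * (i / (2 * g)) = U at h3 ⊢
      omega
    have h3 : ¬ (i < 1048576) := by omega
    simp [h3, hR]
  · push_neg at hbig
    -- decompose i at granularity 4g
    have hqr := Nat.div_add_mod i (4 * g)
    have hrlt : i % (4 * g) < 4 * g := Nat.mod_lt _ (by omega)
    set q := i / (4 * g) with hq
    set r := i % (4 * g) with hr
    -- facts at granularity 2g
    have hd2 : i / (2 * g) = 2 * q + r / (2 * g) := by
      rw [← hqr]
      have h : 4 * g * q + r = 2 * g * (2 * q) + r := by ring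
      rw [h, Nat.mul_add_div (by omega)]
    have hm2 : i % (2 * g) = r % (2 * g) := by
      rw [← hqr]
      have h : 4 * g * q + r = 2 * g * (2 * q) + r := by ring
      rw [h, Nat.mul_add_mod]
    have hxbit : x.testBit i = (decide (r < 2 * g) && y.testBit (2 * g * q + r)) := hx i
    rcases Nat.lt_or_ge r g with hc1 | hge
    · -- r < g : survives from the un-shifted copy
      have hdd : r / (2 * g) = 0 := Nat.div_eq_of_lt (by omega)
      have hmm : r % (2 * g) = r := Nat.mod_eq_of_lt (by omega)
      have hidx : g * (i / (2 * g)) + i % (2 * g) = 2 * g * q + r := by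
        rw [hd2, hm2, hdd, hmm]; ring
      have hshift : (decide (g ≤ i) && x.testBit (i - g)) = false := by
        rcases Nat.eq_zero_or_pos q with hq0 | hqpos
        · rw [hq0] at hqr
          simp only [Nat.mul_zero, Nat.zero_add] at hqr
          have h : ¬ (g ≤ i) := by omega
          simp [h]
        · have hP1 : 4 * g ≤ 4 * g * q := Nat.le_mul_of_pos_right _ hqpos
          have hP2 : 4 * g * (q - 1) = 4 * g * q - 4 * g := by
            rw [Nat.mul_sub, Nat.mul_one]
          have hrep : i - g = 4 * g * (q - 1) + (3 * g + r) := by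
            generalize h1 : 4 * g * q = P1 at *
            generalize h2 : 4 * g * (q - 1) = P2 at *
            omega
          have hmod : (i - g) % (4 * g) = 3 * g + r := by
            rw [hrep, Nat.mul_add_mod, Nat.mod_eq_of_lt (by omega)]
          have h : x.testBit (i - g) = false := by
            rw [hx, hmod]
            simp; omega
          simp [h]
      rw [hxbit, hshift, hidx, hm2, hmm]
      by_cases hi : i < 1048576
      · simp [hi, hc1, decide_eq_true (by omega : r < 2 * g)]
      · omega
    · rcases Nat.lt_or_ge r (2 * g) with hc2 | hge2
      · -- g ≤ r < 2g : mask kills the left, the mod kills the right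
        have hmm : r % (2 * g) = r := Nat.mod_eq_of_lt (by omega)
        have h : ¬ (i % (2 * g) < g) := by rw [hm2, hmm]; omega
        simp [h]
      · rcases Nat.lt_or_ge r (3 * g) with hc3 | hge3
        · -- 2g ≤ r < 3g : survives from the shifted copy
          have hdd : r / (2 * g) = 1 := by
            rw [Nat.div_eq_sub_div (by omega) (by omega), Nat.div_eq_of_lt (by omega)]
          have hmm : r % (2 * g) = r - 2 * g := by
            rw [Nat.mod_eq_sub_mod (by omega), Nat.mod_eq_of_lt (by omega)]
          have hgi : g ≤ i := by omega
          have hrep : i - g = 4 * g * q + (r - g) := by omega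
          have hmodg : (i - g) % (4 * g) = r - g := by
            rw [hrep, Nat.mul_add_mod, Nat.mod_eq_of_lt (by omega)]
          have hdivg : (i - g) / (4 * g) = q := by
            rw [hrep, Nat.mul_add_div (by omega), Nat.div_eq_of_lt (by omega), Nat.add_zero]
          have hxg : x.testBit (i - g) = y.testBit (2 * g * q + (r - g)) := by
            rw [hx, hmodg, hdivg, decide_eq_true (by omega : r - g < 2 * g), Bool.true_and]
          have hxi : x.testBit i = false := by
            rw [hxbit, decide_eq_false (by omega : ¬ (r < 2 * g)), Bool.false_and]
          have hidx : g * (i / (2 * g)) + i % (2 * g) = 2 * g * q + (r - g) := by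
            rw [hd2, hm2, hdd, hmm]
            have h : g * (2 * q + 1) = 2 * g * q + g := by ring
            omega
          rw [hxi, hxg, hidx, hm2, hmm]
          by_cases hi : i < 1048576
          · simp [hi, hgi, decide_eq_true (by omega : r - 2 * g < g)]
          · omega
        · -- 3g ≤ r < 4g : mod kills both sides
          have hmm : r % (2 * g) = r - 2 * g := by
            rw [Nat.mod_eq_sub_mod (by omega), Nat.mod_eq_of_lt (by omega)]
          have h : ¬ (i % (2 * g) < g) := by rw [hm2, hmm]; omega
          simp [h]

theorem pvMaskList_getD (j : Nat) (hj : j < 17) :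
    pvMaskList.getD j 0 = pvMaskRep (2 ^ j) (19 - j) := by
  simp [pvMaskList, List.getD_eq_getElem?_getD, List.getElem?_map, List.getElem?_range, hj]

theorem pvSpreadN_bits :
    ∀ (j : Nat), j ≤ 17 → ∀ (x y : Nat), y < 2 ^ 131072 →
    (∀ i, x.testBit i = (decide (i % (2 * 2 ^ j) < 2 ^ j) &&
        y.testBit (2 ^ j * (i / (2 * 2 ^ j)) + i % (2 * 2 ^ j)))) →
    ∀ i, (pvSpreadN j x).testBit i = (decide (i % 2 = 0) && y.testBit (i / 2)) := by
  intro j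
  induction j with
  | zero =>
    intro _ x y hy hx i
    have h := hx i
    simp only [pow_zero, mul_one, one_mul, pvSpreadN] at h ⊢
    rcases Nat.mod_two_eq_zero_or_one i with h2 | h2
    · have : i % 2 < 1 := by omega
      rw [h]
      have e : i / 2 + i % 2 = i / 2 := by omega
      simp [this, h2, e]
    · have : ¬ (i % 2 < 1) := by omega
      have e : ¬ (i % 2 = 0) := by omega
      simp [h, this, e]
  | succ j ih =>
    intro hj x y hy hx i
    have hjj : j < 17 := by omega
    set g : Nat := 2 ^ j with hgdef
    have hg1 : 1 ≤ g := Nat.one_le_two_pow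
    have hg2 : g ≤ 65536 := by
      have : (2:Nat) ^ j ≤ 2 ^ 16 := Nat.pow_le_pow_right (by norm_num) (by omega)
      simpa using this
    have e1 : (2:Nat) ^ (j+1) = 2 * g := by rw [pow_succ]; ring
    have e2 : 2 * (2 * g) = 4 * g := by ring
    have hw : 2 * g * 2 ^ (19 - j) = 1048576 := by
      rw [hgdef]
      have e3 : (2:Nat) * 2 ^ j = 2 ^ (j + 1) := by rw [pow_succ]; ring
      rw [e3, ← pow_add]
      have e4 : j + 1 + (19 - j) = 20 := by omega
      rw [e4]; norm_num
    simp only [e1, e2] at hx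
    have hx' := spreadStep g (19 - j) y x hg1 hg2 hw hy hx
    have : (pvSpreadN (j+1) x) = pvSpreadN j ((x ||| (x <<< g)) &&& pvMaskRep g (19 - j)) := by
      rw [pvSpreadN, pvMaskList_getD j hjj, hgdef]
    rw [this]
    exact ih (by omega) _ y hy hx' i

theorem pvSpread_testBit (y : Nat) (hy : y < 2 ^ 131072) :
    ∀ i, (pvSpread y).testBit i = (decide (i % 2 = 0) && y.testBit (i / 2)) := by
  have hinit : ∀ i, y.testBit i = (decide (i % (2 * 2 ^ 17) < 2 ^ 17) &&
      y.testBit (2 ^ 17 * (i / (2 * 2 ^ 17)) + i % (2 * 2 ^ 17))) := by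
    intro i
    have h262144 : (2:Nat) * 2 ^ 17 = 262144 := by norm_num
    have h131072 : (2:Nat) ^ 17 = 131072 := by norm_num
    rw [h262144, h131072]
    have hqr := Nat.div_add_mod i 262144
    have hrlt : i % 262144 < 262144 := Nat.mod_lt _ (by norm_num)
    set q := i / 262144 with hq
    set r := i % 262144 with hr
    rcases Nat.eq_zero_or_pos q with hq0 | hqpos
    · rw [hq0] at hqr
      simp only [Nat.mul_zero, Nat.zero_add] at hqr
      rcases Nat.lt_or_ge r 131072 with hc | hc
      · simp [hq0, hc, ← hqr]
      · have hL : y.testBit i = false := tb_false hy (by omega)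
        simp [hL, hc]
    · have hP1 : 262144 * 1 ≤ 262144 * q := Nat.mul_le_mul_left _ hqpos
      have hL : y.testBit i = false := tb_false hy (by omega)
      rcases Nat.lt_or_ge r 131072 with hc | hc
      · have hR : y.testBit (131072 * q + r) = false := by
          apply tb_false hy
          have h1 : 131072 * 1 ≤ 131072 * q := Nat.mul_le_mul_left _ hqpos
          omega
        simp [hL, hR, hc]
      · simp [hL, hc]
  exact pvSpreadN_bits 17 (le_refl _) y y hy hinit

theorem pvStepBits_testBit (s : Nat) : ∀ q, (pvStepBits s).testBit q =
    (decide (q ≤ 200000) &&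
      (s.testBit (q + 1) || (decide (1 ≤ q) && s.testBit (q - 1)) ||
       (decide (q % 2 = 0 ∧ q / 2 ≤ 100000) && s.testBit (q / 2)))) := by
  intro q
  have htop : ∀ i, pvTop.testBit i = decide (i < 200001) := by
    intro i; rw [pvTop, Nat.testBit_two_pow_sub_one]
  have hlow : ∀ i, pvLow.testBit i = decide (i < 100001) := by
    intro i; rw [pvLow, Nat.testBit_two_pow_sub_one]
  unfold pvStepBits
  by_cases hT : s == pvTop
  · rw [if_pos hT]
    have hs : s = pvTop := by simpa using hT
    rw [hs, htop]
    by_cases hq : q ≤ 200000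
    · have h1 : (q < 200001) := by omega
      rcases Nat.eq_zero_or_pos q with h0 | hpos
      · subst h0
        simp [htop, h1]
      · simp [htop, h1, hq]
        omega
    · have h1 : ¬ (q < 200001) := by omega
      simp [h1, hq]
  · rw [if_neg hT]
    have hy : s &&& pvLow < 2 ^ 131072 := by
      have h1 : s &&& pvLow ≤ pvLow := Nat.and_le_right
      have h2 : pvLow < 2 ^ 131072 := by
        rw [pvLow]
        have : (2:Nat) ^ 100001 ≤ 2 ^ 131072 := Nat.pow_le_pow_right (by norm_num) (by norm_num)
        omega
      omega
    have hd : ∀ (d : Nat), (d = if (s &&& pvLow) == 0 then 0 else pvSpread (s &&& pvLow)) →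
        ∀ i, d.testBit i = (decide (i % 2 = 0 ∧ i / 2 ≤ 100000) && s.testBit (i / 2)) := by
      intro d hdef i
      by_cases h0 : (s &&& pvLow) == 0
      · have hz : s &&& pvLow = 0 := by simpa using h0
        rw [hdef, if_pos h0]
        have : (s &&& pvLow).testBit (i / 2) = false := by rw [hz]; simp
        rw [Nat.testBit_land, hlow] at this
        simp only [Nat.zero_testBit]
        by_cases hc : i % 2 = 0 ∧ i / 2 ≤ 100000
        · have : s.testBit (i / 2) = false := by
            rcases Bool.and_eq_false_iff.mp this with h | h
            · exact h
            · exfalso; revert h; simp; omega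
          simp [hc, this]
        · simp [hc]
      · rw [hdef, if_neg h0]
        rw [pvSpread_testBit _ hy i, Nat.testBit_land, hlow]
        by_cases he : i % 2 = 0
        · by_cases hc : i / 2 ≤ 100000
          · have h1 : (i / 2 < 100001) := by omega
            simp [he, hc, h1]
          · have h1 : ¬ (i / 2 < 100001) := by omega
            simp [he, hc, h1]
        · simp [he]
    simp only [Nat.testBit_land, Nat.testBit_lor, htop,
      Nat.testBit_shiftRight, Nat.testBit_shiftLeft, hd _ rfl, ge_iff_le]
    have e1 : 1 + q = q + 1 := by omega
    rw [e1]
    by_cases hq : q ≤ 200000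
    · have h1 : (q < 200001) := by omega
      simp [h1, hq]
    · have h1 : ¬ (q < 200001) := by omega
      simp [h1, hq]

-- ---------- semantic level sets ----------

def chn (l : List Int) : List Int :=
  l.flatMap fun p => if 0 ≤ p ∧ p ≤ 200000 then [p + 1, p - 1, p * 2] else []

def lvl (B : Int) : Nat → List Int
  | 0 => [B]
  | k+1 => chn (lvl B k)

def conyF (C : Int) : Nat → Int
  | 0 => C
  | k+1 => conyF C k + ((k : Int) + 1)

abbrev hitP (C B : Int) (t : Nat) : Prop :=
  0 ≤ conyF C t ∧ conyF C t ≤ 200000 ∧ conyF C t ∈ lvl B t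

theorem chn_mem (l : List Int) (x : Int) :
    x ∈ chn l ↔ ∃ p ∈ l, (0 ≤ p ∧ p ≤ 200000) ∧ (x = p + 1 ∨ x = p - 1 ∨ x = p * 2) := by
  simp only [chn, List.mem_flatMap]
  constructor
  · rintro ⟨p, hp, hx⟩
    by_cases h : (0 ≤ p ∧ p ≤ 200000)
    · rw [if_pos h] at hx
      simp only [List.mem_cons, List.mem_singleton, List.not_mem_nil, or_false] at hx
      exact ⟨p, hp, h, by tauto⟩
    · rw [if_neg h] at hx
      simp at hx
  · rintro ⟨p, hp, h, hc⟩
    refine ⟨p, hp, ?_⟩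
    rw [if_pos h]
    simp only [List.mem_cons, List.mem_singleton, List.not_mem_nil, or_false]
    tauto

theorem stepBits_lvl (B : Int) (k : Nat) (s : Nat)
    (hs : ∀ q : Nat, s.testBit q = decide ((q : Int) ∈ lvl B k ∧ (q : Int) ≤ 200000)) :
    ∀ q : Nat, (pvStepBits s).testBit q = decide ((q : Int) ∈ lvl B (k+1) ∧ (q : Int) ≤ 200000) := by
  intro q
  rw [pvStepBits_testBit, hs, hs, hs, Bool.eq_iff_iff]
  simp only [Bool.and_eq_true, Bool.or_eq_true, decide_eq_true_eq]
  have hlvl : lvl B (k+1) = chn (lvl B k) := rfl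
  rw [hlvl]
  constructor
  · rintro ⟨hq, h⟩
    rcases h with (⟨hm, hb⟩ | ⟨hq1, hm, hb⟩) | ⟨⟨he, hh⟩, hm, hb⟩
    · refine ⟨(chn_mem _ _).mpr ⟨((q:Int) + 1), ?_, ⟨by omega, by push_cast at hb ⊢; omega⟩, ?_⟩, by omega⟩
      · push_cast at hm ⊢; exact hm
      · right; left; omega
    · refine ⟨(chn_mem _ _).mpr ⟨((q:Int) - 1), ?_, ⟨by omega, ?_⟩, ?_⟩, by omega⟩
      · have e : ((q - 1 : Nat) : Int) = (q : Int) - 1 := by omega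
        rw [e] at hm; exact hm
      · have e : ((q - 1 : Nat) : Int) = (q : Int) - 1 := by omega
        rw [e] at hb; omega
      · left; omega
    · refine ⟨(chn_mem _ _).mpr ⟨((q / 2 : Nat) : Int), hm, ⟨by omega, by omega⟩, ?_⟩, by omega⟩
      right; right
      omega
  · rintro ⟨hmem, hq⟩
    obtain ⟨p, hp, ⟨hp0, hp2⟩, hc⟩ := (chn_mem _ _).mp hmem
    refine ⟨by omega, ?_⟩
    rcases hc with hc | hc | hc
    · left; right
      have hq1 : 1 ≤ q := by omega
      have e : ((q - 1 : Nat) : Int) = p := by omega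
      exact ⟨hq1, by rw [e]; exact ⟨hp, by omega⟩⟩
    · left; left
      have e : ((q + 1 : Nat) : Int) = p := by push_cast; omega
      rw [e]; exact ⟨hp, by omega⟩
    · right
      have he : q % 2 = 0 := by omega
      have hh : ((q / 2 : Nat) : Int) = p := by omega
      exact ⟨⟨he, by omega⟩, by rw [hh]; exact ⟨hp, by omega⟩⟩

theorem pvMeetLoop_sound (C B : Int) : ∀ (n : Nat) (k : Nat) (s : Nat),
    (∀ q : Nat, s.testBit q = decide ((q : Int) ∈ lvl B k ∧ (q : Int) ≤ 200000)) →
    pvMeetLoop n s (conyF C k) ((k : Int) + 1) = true → ∃ t, hitP C B t := by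
  intro n
  induction n with
  | zero => intro k s _ h; simp [pvMeetLoop] at h
  | succ n ih =>
    intro k s hs h
    rw [pvMeetLoop] at h
    by_cases h1 : conyF C k > 200000
    · rw [if_pos h1] at h; simp at h
    · rw [if_neg h1] at h
      by_cases h2 : (0 ≤ conyF C k && s.testBit (conyF C k).toNat) = true
      · rcases Bool.and_eq_true_iff.mp h2 with ⟨h3, h4⟩
        have h3' : 0 ≤ conyF C k := by simpa using h3
        rw [hs] at h4
        have e : (((conyF C k).toNat : Nat) : Int) = conyF C k := Int.toNat_of_nonneg h3'
        rw [e] at h4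
        simp only [decide_eq_true_eq] at h4
        exact ⟨k, h3', by omega, h4.1⟩
      · rw [if_neg h2] at h
        have e1 : conyF C k + ((k : Int) + 1) = conyF C (k + 1) := by rw [conyF]
        have e2 : ((k : Int) + 1) + 1 = ((k + 1 : Nat) : Int) + 1 := by push_cast; ring
        rw [e1, e2] at h
        exact ih (k + 1) (pvStepBits s) (stepBits_lvl B k s hs) h

theorem pvMeets_sound (C B : Int) (h : pvMeets C B = true) :
    (0 ≤ B ∧ B ≤ 200000) ∧ ∃ t, hitP C B t := by
  rw [pvMeets] at h
  by_cases hB : (B < 0 || B > 200000) = true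
  · rw [if_pos hB] at h; simp at h
  · rw [if_neg hB] at h
    simp only [Bool.or_eq_true, decide_eq_true_eq, not_or] at hB
    push_neg at hB
    have hB0 : 0 ≤ B := by omega
    have hB2 : B ≤ 200000 := by omega
    refine ⟨⟨hB0, hB2⟩, ?_⟩
    have hs : ∀ q : Nat, (2 ^ B.toNat : Nat).testBit q =
        decide ((q : Int) ∈ lvl B 0 ∧ (q : Int) ≤ 200000) := by
      intro q
      rw [Nat.testBit_two_pow, Bool.eq_iff_iff]
      simp only [decide_eq_true_eq]
      have hlvl : lvl B 0 = [B] := rfl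
      rw [hlvl]
      simp only [List.mem_singleton]
      omega
    have e0 : conyF C 0 = C := rfl
    have e1 : ((0 : Nat) : Int) + 1 = 1 := by norm_num
    rw [← e0, ← e1] at h
    exact pvMeetLoop_sound C B 65601 0 _ hs h

-- ---------- port A defs (as they will appear in equiv.lean) ----------

def bfsQ (cony : List Int) : Nat → List (Int × Int) → Int → Int
  | 0, _, _ => -2
  | _+1, [], _ => -1
  | n+1, (time, bpos) :: rest, ans =>
    if bpos < 0 ∨ bpos > 200000 then bfsQ cony n rest ans
    else
      match PySem.List.pyGet? cony time with
      | none => -2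
      | some c =>
        if bpos = c then min ans time
        else bfsQ cony n (rest ++ [(time + 1, bpos + 1), (time + 1, bpos - 1), (time + 1, bpos * 2)]) ans

theorem bfsA_eq_bfsQ (cony : List Int) :
    ∀ (n : Nat) (f b : List (Int × Int)) (ans : Int),
      bfsA cony n f b ans = bfsQ cony n (f ++ b.reverse) ans := by
  intro n
  induction n with
  | zero => intro f b ans; rfl
  | succ n ih =>
    intro f b ans
    match f with
    | [] =>
      rw [List.nil_append]
      match hb : b.reverse with
      | [] => simp [bfsA, bfsQ, dqPop, hb]
      | (time, bpos) :: f' =>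
        rw [bfsA, bfsQ]
        simp only [dqPop, hb]
        by_cases hskip : bpos < 0 ∨ bpos > 200000
        · rw [if_pos hskip, if_pos hskip, ih]
          simp
        · rw [if_neg hskip, if_neg hskip]
          match PySem.List.pyGet? cony time with
          | none => rfl
          | some c =>
            by_cases heq : bpos = c
            · simp [heq]
            · simp only [heq, if_neg, ite_false]
              rw [ih]
              simp
    | (time, bpos) :: f' =>
      rw [List.cons_append, bfsA, bfsQ]
      simp only [dqPop]
      by_cases hskip : bpos < 0 ∨ bpos > 200000
      · rw [if_pos hskip, if_pos hskip, ih]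
      · rw [if_neg hskip, if_neg hskip]
        match PySem.List.pyGet? cony time with
        | none => rfl
        | some c =>
          by_cases heq : bpos = c
          · simp [heq]
          · simp only [heq, if_neg, ite_false]
            rw [ih]
            simp

def Lmap (t : Nat) (l : List Int) : List (Int × Int) := l.map (fun p => ((t : Int), p))

theorem bfsQ_level (cony : List Int) (t : Nat) (ct : Int)
    (hget : PySem.List.pyGet? cony ((t : Nat) : Int) = some ct) :
    ∀ (l m : List Int) (n : Nat) (ans : Int),
      (∀ p ∈ l, 0 ≤ p → p ≤ 200000 → p ≠ ct) →
      bfsQ cony (n + l.length) (Lmap t l ++ Lmap (t+1) m) ans =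
        bfsQ cony n (Lmap (t+1) (m ++ chn l)) ans := by
  intro l
  induction l with
  | nil => intro m n ans _; simp [Lmap, chn]
  | cons p l' ih =>
    intro m n ans hno
    have hlen : n + (p :: l').length = (n + l'.length) + 1 := by simp; omega
    rw [hlen]
    have hq : Lmap t (p :: l') ++ Lmap (t+1) m =
        ((t : Int), p) :: (Lmap t l' ++ Lmap (t+1) m) := by simp [Lmap]
    rw [hq, bfsQ]
    have hchn : chn (p :: l') =
        (if 0 ≤ p ∧ p ≤ 200000 then [p + 1, p - 1, p * 2] else []) ++ chn l' := by
      simp [chn]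
    by_cases hr : 0 ≤ p ∧ p ≤ 200000
    · have hskip : ¬ (p < 0 ∨ p > 200000) := by omega
      rw [if_neg hskip]
      simp only [hget]
      have hne : p ≠ ct := hno p (List.mem_cons_self) hr.1 hr.2
      rw [if_neg hne]
      have hq2 : (Lmap t l' ++ Lmap (t+1) m) ++
          [((t : Int) + 1, p + 1), ((t : Int) + 1, p - 1), ((t : Int) + 1, p * 2)] =
          Lmap t l' ++ Lmap (t+1) (m ++ [p + 1, p - 1, p * 2]) := by
        simp [Lmap]
      rw [hq2, ih (m ++ [p + 1, p - 1, p * 2]) n ans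
        (fun x hx h1 h2 => hno x (List.mem_cons_of_mem _ hx) h1 h2)]
      rw [hchn, if_pos hr]
      congr 1
      simp [List.append_assoc]
    · have hskip : (p < 0 ∨ p > 200000) := by omega
      rw [if_pos hskip,
        ih m n ans (fun x hx h1 h2 => hno x (List.mem_cons_of_mem _ hx) h1 h2),
        hchn, if_neg hr]
      simp

theorem bfsQ_level_hit (cony : List Int) (t : Nat) (ct : Int)
    (hget : PySem.List.pyGet? cony ((t : Nat) : Int) = some ct) :
    ∀ (l : List Int) (m : List Int) (n : Nat) (ans : Int),
      (∃ p ∈ l, (0 ≤ p ∧ p ≤ 200000) ∧ p = ct) → l.length ≤ n →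
      bfsQ cony n (Lmap t l ++ Lmap (t+1) m) ans = min ans (t : Int) := by
  intro l
  induction l with
  | nil => intro m n ans h _; simp at h
  | cons p l' ih =>
    intro m n ans hex hn
    match n, hn with
    | n'+1, hn' =>
      have hq : Lmap t (p :: l') ++ Lmap (t+1) m =
          ((t : Int), p) :: (Lmap t l' ++ Lmap (t+1) m) := by simp [Lmap]
      rw [hq, bfsQ]
      by_cases hr : 0 ≤ p ∧ p ≤ 200000
      · have hskip : ¬ (p < 0 ∨ p > 200000) := by omega
        rw [if_neg hskip]
        simp only [hget]
        by_cases he : p = ct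
        · rw [if_pos he]
        · rw [if_neg he]
          have hex' : ∃ x ∈ l', (0 ≤ x ∧ x ≤ 200000) ∧ x = ct := by
            obtain ⟨x, hx, hx2⟩ := hex
            rcases List.mem_cons.mp hx with h | h
            · exact absurd (by rw [← h]; exact hx2.2) he
            · exact ⟨x, h, hx2⟩
          have hq2 : (Lmap t l' ++ Lmap (t+1) m) ++
              [((t : Int) + 1, p + 1), ((t : Int) + 1, p - 1), ((t : Int) + 1, p * 2)] =
              Lmap t l' ++ Lmap (t+1) (m ++ [p + 1, p - 1, p * 2]) := by
            simp [Lmap]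
          rw [hq2]
          exact ih _ n' ans hex' (by simp at hn'; omega)
      · have hskip : (p < 0 ∨ p > 200000) := by omega
        rw [if_pos hskip]
        have hex' : ∃ x ∈ l', (0 ≤ x ∧ x ≤ 200000) ∧ x = ct := by
          obtain ⟨x, hx, hx2⟩ := hex
          rcases List.mem_cons.mp hx with h | h
          · exact absurd (h ▸ hx2.1) hr
          · exact ⟨x, h, hx2⟩
        exact ih _ n' ans hex' (by simp at hn'; omega)

def lvlW (B : Int) (k : Nat) : Nat := ((List.range k).map (fun j => (lvl B j).length)).sum

theorem bfsQ_run (C B : Int) (cony : List Int) :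
    ∀ (k : Nat) (n : Nat) (ans : Int),
      (∀ j, j < k → ¬ hitP C B j) →
      (∀ j, j < k → PySem.List.pyGet? cony ((j : Nat) : Int) = some (conyF C j)) →
      bfsQ cony (n + lvlW B k) (Lmap 0 (lvl B 0)) ans = bfsQ cony n (Lmap k (lvl B k)) ans := by
  intro k
  induction k with
  | zero => intro n ans _ _; simp [lvlW]
  | succ k ih =>
    intro n ans hno hg
    have hW : lvlW B (k+1) = lvlW B k + (lvl B k).length := by
      simp [lvlW, List.range_succ]
    have e : n + lvlW B (k+1) = (n + (lvl B k).length) + lvlW B k := by omega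
    rw [e, ih (n + (lvl B k).length) ans (fun j hj => hno j (by omega))
      (fun j hj => hg j (by omega))]
    have hnolvl : ∀ p ∈ lvl B k, 0 ≤ p → p ≤ 200000 → p ≠ conyF C k := by
      intro p hp h1 h2 he
      exact hno k (by omega) ⟨by omega, by omega, by rw [← he]; exact hp⟩
    have hm : Lmap k (lvl B k) = Lmap k (lvl B k) ++ Lmap (k+1) [] := by simp [Lmap]
    rw [hm, bfsQ_level cony k (conyF C k) (hg k (by omega)) (lvl B k) [] n ans hnolvl]
    have : ([] : List Int) ++ chn (lvl B k) = lvl B (k+1) := by simp [lvl]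
    rw [this]

theorem chn_len (l : List Int) : (chn l).length ≤ 3 * l.length := by
  induction l with
  | nil => simp [chn]
  | cons p l' ih =>
    have : chn (p :: l') =
        (if 0 ≤ p ∧ p ≤ 200000 then [p + 1, p - 1, p * 2] else []) ++ chn l' := by simp [chn]
    rw [this]
    rw [List.length_append]
    have h1 : (if 0 ≤ p ∧ p ≤ 200000 then [p + 1, p - 1, p * 2] else []).length ≤ 3 := by
      split_ifs <;> simp
    simp only [List.length_cons]
    omega

theorem lvl_len (B : Int) : ∀ k, (lvl B k).length ≤ 3 ^ k := by
  intro k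
  induction k with
  | zero => simp [lvl]
  | succ k ih =>
    have h1 := chn_len (lvl B k)
    have h2 : (lvl B (k+1)).length = (chn (lvl B k)).length := rfl
    have h3 : (3:Nat) ^ (k+1) = 3 * 3 ^ k := by ring
    calc (lvl B (k+1)).length ≤ 3 * (lvl B k).length := by rw [h2]; exact h1
      _ ≤ 3 * 3 ^ k := by omega
      _ = 3 ^ (k+1) := by omega

theorem lvlW_le (B : Int) : ∀ k, lvlW B k ≤ 3 ^ k := by
  intro k
  induction k with
  | zero => simp [lvlW]
  | succ k ih =>
    have hW : lvlW B (k+1) = lvlW B k + (lvl B k).length := by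
      simp [lvlW, List.range_succ]
    have h1 := lvl_len B k
    have h3 : (3:Nat) ^ (k+1) = 3 * 3 ^ k := by ring
    omega

-- ---------- CONY list ----------

def conyT : Nat → Nat
  | 0 => 0
  | k+1 => conyT k + (k+1)

theorem conyF_eq (C : Int) : ∀ k, conyF C k = C + (conyT k : Int) := by
  intro k
  induction k with
  | zero => simp [conyF, conyT]
  | succ k ih => rw [conyF, conyT, ih]; push_cast; ring

theorem conyT_closed : ∀ k, 2 * conyT k = k * (k + 1) := by
  intro k
  induction k with
  | zero => rfl
  | succ k ih =>
    have h : (k + 1) * (k + 1 + 1) = k * (k + 1) + 2 * (k + 1) := by ring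
    rw [conyT, h]
    omega

theorem conyT_mono : ∀ {j k : Nat}, j ≤ k → conyT j ≤ conyT k := by
  intro j k
  induction k with
  | zero =>
    intro h
    have he : j = 0 := by omega
    rw [he]
  | succ k ih =>
    intro h
    rcases Nat.lt_or_ge j (k+1) with h1 | h1
    · have := ih (by omega)
      rw [conyT]; omega
    · have he : j = k + 1 := by omega
      rw [he]

theorem conyF_mono (C : Int) {j k : Nat} (h : j ≤ k) : conyF C j ≤ conyF C k := by
  rw [conyF_eq, conyF_eq]
  have := conyT_mono h
  omega

theorem conyF_65600 (C : Int) (hC : -2147483648 ≤ C) : 200000 < conyF C 65600 := by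
  rw [conyF_eq]
  have h := conyT_closed 65600
  norm_num at h
  omega

theorem conyBuild_go (C : Int) (hM : ∃ m, 200000 < conyF C m) :
    ∀ (n k : Nat), k ≤ Nat.find hM → Nat.find hM - k < n →
      conyBuild n (conyF C k) ((k : Nat) : Int) (((List.range (k+1)).map (conyF C)).reverse) =
        (List.range (Nat.find hM + 1)).map (conyF C) := by
  intro n
  induction n with
  | zero => intro k _ h; omega
  | succ n ih =>
    intro k hk hn
    by_cases hend : k = Nat.find hM
    · have hbig : 200000 < conyF C k := by rw [hend]; exact Nat.find_spec hM
      rw [conyBuild, if_neg (by omega), List.reverse_reverse, hend]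
    · have hlt : k < Nat.find hM := by omega
      have hsmall : ¬ (200000 < conyF C k) := Nat.find_min hM hlt
      rw [conyBuild, if_pos (by omega)]
      have e1 : conyF C k + (((k : Nat) : Int) + 1) = conyF C (k+1) := by rw [conyF]
      have e2 : ((k : Nat) : Int) + 1 = (((k+1 : Nat) : Nat) : Int) := by push_cast; ring
      have e3 : (conyF C k + (((k : Nat) : Int) + 1)) :: ((List.range (k+1)).map (conyF C)).reverse =
          ((List.range (k+2)).map (conyF C)).reverse := by
        rw [e1]
        have : List.range (k+2) = List.range (k+1) ++ [k+1] := by rw [List.range_succ]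
        rw [this]
        simp
      rw [e3]
      rw [e1, e2]
      exact ih (k+1) (by omega) (by omega)

theorem conyBuild_spec (C : Int) (hC : -2147483648 ≤ C) (hM : ∃ m, 200000 < conyF C m) :
    conyBuild 100000 C 0 [C] = (List.range (Nat.find hM + 1)).map (conyF C) := by
  have hle : Nat.find hM ≤ 65600 := Nat.find_min' hM (conyF_65600 C hC)
  have h0 : conyF C 0 = C := rfl
  have h1 : ((0 : Nat) : Int) = 0 := rfl
  have h2 : (((List.range 1).map (conyF C)).reverse : List Int) = [C] := by
    simp [List.range_one, h0]
  have := conyBuild_go C hM 100000 0 (by omega) (by omega)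
  rw [h0, h1, h2] at this
  exact this

theorem cony_get (C : Int) (hM : ∃ m, 200000 < conyF C m) (j : Nat) (hj : j ≤ Nat.find hM) :
    PySem.List.pyGet? ((List.range (Nat.find hM + 1)).map (conyF C)) ((j : Nat) : Int) =
      some (conyF C j) := by
  rw [PySem.List.pyGet?_natCast]
  rw [List.getElem?_map, List.getElem?_range (by omega)]
  rfl

theorem pow3_le {a b : Nat} (h : a ≤ b) : (3:Nat) ^ a ≤ 3 ^ b := Nat.pow_le_pow_right (by norm_num) h

theorem solution_of_hit (C B : Int) (hC : -2147483648 ≤ C) (hB0 : 0 ≤ B) (hB2 : B ≤ 200000)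
    (hex : ∃ t, hitP C B t) : solution C B = ((Nat.find hex : Nat) : Int) := by
  have hhit := Nat.find_spec hex
  have hmin : ∀ j, j < Nat.find hex → ¬ hitP C B j := fun j hj => Nat.find_min hex hj
  set T := Nat.find hex with hT
  have hM : ∃ m, 200000 < conyF C m := ⟨65600, conyF_65600 C hC⟩
  have hMle : Nat.find hM ≤ 65600 := Nat.find_min' hM (conyF_65600 C hC)
  have hTM : T < Nat.find hM := by
    by_contra hcon
    push_neg at hcon
    have h1 : conyF C (Nat.find hM) ≤ conyF C T := conyF_mono C hcon
    have h2 := Nat.find_spec hM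
    have h3 := hhit.2.1
    omega
  have hT65599 : T ≤ 65599 := by omega
  -- the CONY list
  have hcony := conyBuild_spec C hC hM
  -- fuel bookkeeping
  have hWle : lvlW B T ≤ 3 ^ 65599 := le_trans (lvlW_le B T) (pow3_le hT65599)
  have hLle : (lvl B T).length ≤ 3 ^ 65599 := le_trans (lvl_len B T) (pow3_le hT65599)
  have hfuel : lvlW B T + (lvl B T).length ≤ 3 ^ 65602 := by
    have h1 : (3:Nat) ^ 65599 + 3 ^ 65599 ≤ 3 ^ 65600 := by
      have : (3:Nat) ^ 65600 = 3 ^ 65599 * 3 := by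
        rw [show (65600:Nat) = 65599 + 1 from rfl, pow_succ]
      omega
    have h2 : (3:Nat) ^ 65600 ≤ 3 ^ 65602 := pow3_le (by omega)
    omega
  simp only [solution]
  rw [hcony, bfsA_eq_bfsQ]
  have hq0 : ([((0:Int), B)] ++ ([] : List (Int × Int)).reverse) = Lmap 0 (lvl B 0) := by
    simp [Lmap, lvl]
  rw [hq0]
  have hsplit : (3:Nat) ^ 65602 = (3 ^ 65602 - lvlW B T) + lvlW B T := by omega
  rw [hsplit]
  rw [bfsQ_run C B _ T (3 ^ 65602 - lvlW B T) 1000000000 hmin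
    (fun j hj => cony_get C hM j (by omega))]
  have hm : Lmap T (lvl B T) = Lmap T (lvl B T) ++ Lmap (T+1) [] := by simp [Lmap]
  rw [hm]
  rw [bfsQ_level_hit _ T (conyF C T) (cony_get C hM T (by omega)) (lvl B T) [] _ _
    ⟨conyF C T, hhit.2.2, ⟨hhit.1, hhit.2.1⟩, rfl⟩ (by omega)]
  have : ((T : Nat) : Int) ≤ 1000000000 := by
    have : ((T : Nat) : Int) ≤ 65599 := by exact_mod_cast hT65599
    omega
  exact min_eq_right this

theorem solution_out (C B : Int) (h : B < 0 ∨ B > 200000) : solution C B = -1 := by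
  have h2 : (2:Nat) ≤ 3 ^ 65602 := by
    calc (2:Nat) ≤ 3 := by norm_num
    _ = 3 ^ 1 := by norm_num
    _ ≤ 3 ^ 65602 := pow3_le (by omega)
  have hsplit : (3:Nat) ^ 65602 = (3 ^ 65602 - 2) + 1 + 1 := by omega
  simp only [solution]
  rw [hsplit, bfsA]
  simp only [dqPop]
  rw [if_pos h, bfsA]
  simp [dqPop]

-- ---------- port B ----------

theorem altInner_mem (p x : Int) (acc : PySem.Set Int) :
    x ∈ ([p - 1, p + 1, p * 2].foldl (fun nxt q =>
      if 0 ≤ q ∧ q ≤ 200000 then PySem.Set.add nxt q else nxt) acc) ↔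
    x ∈ acc ∨ ((x = p - 1 ∨ x = p + 1 ∨ x = p * 2) ∧ (0 ≤ x ∧ x ≤ 200000)) := by
  simp only [List.foldl_cons, List.foldl_nil]
  split_ifs <;>
    ((try simp only [PySem.Set.mem_add]); by_cases hA : x ∈ acc <;> (try simp [hA]) <;> omega)

theorem altExpand_mem (cur : PySem.Set Int) (x : Int) :
    x ∈ altExpand cur ↔
      ∃ p ∈ cur, (x = p - 1 ∨ x = p + 1 ∨ x = p * 2) ∧ (0 ≤ x ∧ x ≤ 200000) := by
  have main : ∀ (l : List Int) (acc : PySem.Set Int),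
      x ∈ l.foldl (fun nxt p =>
        [p - 1, p + 1, p * 2].foldl (fun nxt q =>
          if 0 ≤ q ∧ q ≤ 200000 then PySem.Set.add nxt q else nxt) nxt) acc ↔
      x ∈ acc ∨ ∃ p ∈ l, (x = p - 1 ∨ x = p + 1 ∨ x = p * 2) ∧ (0 ≤ x ∧ x ≤ 200000) := by
    intro l
    induction l with
    | nil => intro acc; simp
    | cons p l' ih =>
      intro acc
      rw [List.foldl_cons, ih, altInner_mem]
      constructor
      · rintro ((h | h) | ⟨p', hp', hc⟩)
        · exact Or.inl h
        · exact Or.inr ⟨p, List.mem_cons_self, h⟩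
        · exact Or.inr ⟨p', List.mem_cons_of_mem _ hp', hc⟩
      · rintro (h | ⟨p', hp', hc⟩)
        · exact Or.inl (Or.inl h)
        · rcases List.mem_cons.mp hp' with he | hm
          · exact Or.inl (Or.inr (he ▸ hc))
          · exact Or.inr ⟨p', hm, hc⟩
  rw [altExpand, main]
  simp [PySem.Set.empty]

theorem altLoop_run (C B : Int) (hex : ∃ t, hitP C B t) :
    ∀ (n k : Nat) (cur : PySem.Set Int),
      (∀ x : Int, x ∈ cur ↔ (x ∈ lvl B k ∧ 0 ≤ x ∧ x ≤ 200000)) →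
      k ≤ Nat.find hex → Nat.find hex - k < n →
      altLoop n cur (conyF C k) ((k : Nat) : Int) = ((Nat.find hex : Nat) : Int) := by
  intro n
  induction n with
  | zero => intro k cur _ _ h; omega
  | succ n ih =>
    intro k cur hcur hk hn
    have hhit := Nat.find_spec hex
    have hc200 : conyF C k ≤ 200000 := le_trans (conyF_mono C hk) hhit.2.1
    rw [altLoop, if_pos hc200]
    by_cases hkT : k = Nat.find hex
    · have hmem : conyF C k ∈ cur := by
        rw [hcur, hkT]
        exact ⟨hhit.2.2, hhit.1, hhit.2.1⟩
      have : PySem.Set.contains cur (conyF C k) = true := (PySem.Set.contains_iff _ _).mpr hmem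
      rw [if_pos this, hkT]
    · have hklt : k < Nat.find hex := by omega
      have hnomem : ¬ (PySem.Set.contains cur (conyF C k) = true) := by
        intro hcon
        have hm := (PySem.Set.contains_iff _ _).mp hcon
        rw [hcur] at hm
        exact Nat.find_min hex hklt ⟨hm.2.1, hm.2.2, hm.1⟩
      rw [if_neg hnomem]
      have hcur' : ∀ x : Int, x ∈ altExpand cur ↔ (x ∈ lvl B (k+1) ∧ 0 ≤ x ∧ x ≤ 200000) := by
        intro x
        rw [altExpand_mem]
        have hlvl : lvl B (k+1) = chn (lvl B k) := rfl
        rw [hlvl, chn_mem]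
        constructor
        · rintro ⟨p, hp, hc, hx⟩
          rw [hcur] at hp
          exact ⟨⟨p, hp.1, ⟨hp.2.1, hp.2.2⟩, by tauto⟩, hx⟩
        · rintro ⟨⟨p, hp, hpr, hc⟩, hx⟩
          refine ⟨p, ?_, by tauto, hx⟩
          rw [hcur]
          exact ⟨hp, hpr⟩
      have e1 : conyF C k + (((k : Nat) : Int) + 1) = conyF C (k+1) := by rw [conyF]
      have e2 : ((k : Nat) : Int) + 1 = (((k+1 : Nat) : Nat) : Int) := by push_cast; ring
      rw [e1, e2]
      exact ih (k+1) (altExpand cur) hcur' (by omega) (by omega)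

theorem hitT_le (C B : Int) (hC : -2147483648 ≤ C) (hex : ∃ t, hitP C B t) :
    Nat.find hex ≤ 65599 := by
  have hhit := Nat.find_spec hex
  have hM : ∃ m, 200000 < conyF C m := ⟨65600, conyF_65600 C hC⟩
  have hMle : Nat.find hM ≤ 65600 := Nat.find_min' hM (conyF_65600 C hC)
  by_contra hcon
  push_neg at hcon
  have h1 : conyF C (Nat.find hM) ≤ conyF C (Nat.find hex) := conyF_mono C (by omega)
  have h2 := Nat.find_spec hM
  have h3 := hhit.2.1
  omega

theorem alt_of_hit (C B : Int) (hC : -2147483648 ≤ C) (hB0 : 0 ≤ B) (hB2 : B ≤ 200000)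
    (hex : ∃ t, hitP C B t) : solution_alt C B = ((Nat.find hex : Nat) : Int) := by
  rw [solution_alt, if_neg (by omega : ¬ (B < 0 ∨ B > 200000))]
  have hcur : ∀ x : Int, x ∈ PySem.Set.ofList [B] ↔ (x ∈ lvl B 0 ∧ 0 ≤ x ∧ x ≤ 200000) := by
    intro x
    rw [PySem.Set.mem_ofList]
    have hlvl : lvl B 0 = [B] := rfl
    rw [hlvl]
    simp only [List.mem_singleton]
    constructor
    · rintro rfl; exact ⟨rfl, hB0, hB2⟩
    · rintro ⟨h, _⟩; exact h
  have e0 : conyF C 0 = C := rfl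
  have e1 : (((0 : Nat) : Nat) : Int) = 0 := rfl
  have := altLoop_run C B hex 100000 0 (PySem.Set.ofList [B]) hcur (by omega)
    (by have := hitT_le C B hC hex; omega)
  rw [e0, e1] at this
  exact this

theorem alt_out (C B : Int) (h : B < 0 ∨ B > 200000) : solution_alt C B = -1 := by
  rw [solution_alt, if_pos h]

-- ===== VERDICT (by name: the statement is the Claim_ definition above) =====
theorem solution_spec : Claim_equal_solution := by
  intro C B hDom hPre
  unfold Spec_solution
  by_cases hout : B < 0 ∨ B > 200000
  · rw [solution_out C B hout, alt_out C B hout]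
  · have hmeet : pvMeets C B = true := by
      rcases hPre with h | h | h
      · exact absurd (Or.inl h) hout
      · exact absurd (Or.inr h) hout
      · exact h
    have hC : -2147483648 ≤ C := by
      have := hDom
      unfold Dom_solution pvDomInt at this
      simp only [Bool.and_eq_true, decide_eq_true_eq] at this
      exact this.1.1
    obtain ⟨⟨hB0, hB2⟩, hex⟩ := pvMeets_sound C B hmeet
    rw [solution_of_hit C B hC hB0 hB2 hex, alt_of_hit C B hC hB0 hB2 hex]
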